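-- pv_equiv track=rewrite | github.com/handsomeko/yt-dlp-sub | core/ultra_security_fixes_v5.py | _validate_srt_format
-- ===== SOURCE A (Python) =====
-- def _validate_srt_format(content: str) -> bool:
--     """Validate SRT subtitle format"""
--     lines = content.strip().split('\n')
--
--     # Basic SRT validation
--     i = 0
--     while i < len(lines):
--         # Subtitle number
--         if not lines[i].strip().isdigit():
--             return False
--         i += 1
--
--         # Timestamp
--         if i >= len(lines) or '-->' not in lines[i]:
--             return False
--         i += 1
--
--         # Subtitle text (can be multiple lines)
--         while i < len(lines) and lines[i].strip():
--             i += 1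
--         i += 1  # Skip empty line
--
--     return True
-- ===== SOURCE B (Python) =====
-- def _validate_srt_format(content: str) -> bool:
--     """Validate SRT subtitle format"""
--     lines = content.strip().split('\n')
--
--     # Partition lines into record groups at blank lines, keeping empty groups
--     # (a consecutive or whitespace-only blank yields an empty, hence invalid, group).
--     groups = []
--     cur = []
--     for line in lines:
--         if line.strip() == '':
--             groups.append(cur)
--             cur = []
--         else:
--             cur.append(line)
--     groups.append(cur)
--
--     # A record is valid iff it has a digit index line and a '-->' timestamp line;
--     # any further text lines are not inspected.
--     return all(
--         len(g) >= 2 and g[0].strip().isdigit() and '-->' in g[1]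
--         for g in groups
--     )
-- ===== Notes on version B (the rewrite author's own statement) =====
-- stated objective: alternative
-- what changed: Replaces A's index-pointer while-loop walk over the line list with a single partition of the lines into blank-separated record groups (keeping empty groups) followed by a uniform per-group check (digit index line, '-->' timestamp line).
import Mathlib
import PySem

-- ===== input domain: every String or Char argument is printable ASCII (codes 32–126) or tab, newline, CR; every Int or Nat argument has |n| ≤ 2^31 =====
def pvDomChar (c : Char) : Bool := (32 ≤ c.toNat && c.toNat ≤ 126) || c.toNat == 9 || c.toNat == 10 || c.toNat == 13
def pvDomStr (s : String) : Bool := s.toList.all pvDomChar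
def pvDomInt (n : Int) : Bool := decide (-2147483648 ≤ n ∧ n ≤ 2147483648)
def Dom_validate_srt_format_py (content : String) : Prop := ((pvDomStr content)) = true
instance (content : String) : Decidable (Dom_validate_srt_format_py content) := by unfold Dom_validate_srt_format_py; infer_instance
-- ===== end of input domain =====

-- B re-implements A's pointer-walk SRT validation as blank-line partitioning into record
-- groups plus a per-group check ('alternative' decomposition, same cost).

-- ===== PORT A =====
-- inner while: 'while i < len(lines) and lines[i].strip(): i += 1' then 'i += 1' (skip blank)
def pvSkipText : List (List Char) → List (List Char)
  | [] => []
  | l :: ls => if PySem.Chars.strip l ≠ [] then pvSkipText ls else ls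

theorem pvSkipText_length_le (ls : List (List Char)) : (pvSkipText ls).length ≤ ls.length := by
  induction ls with
  | nil => simp [pvSkipText]
  | cons l ls ih =>
    simp only [pvSkipText]
    split
    · exact le_trans ih (Nat.le_succ _)
    · exact Nat.le_succ _

-- outer while over the remaining suffix of lines
def pvLoopA : List (List Char) → Bool
  | [] => true
  | num :: rest =>
    if !(PySem.Chars.strIsdigit (PySem.Chars.strip num)) then false
    else match rest with
      | [] => false
      | ts :: rest2 =>
        if !(PySem.Chars.isIn ['-', '-', '>'] ts) then false
        else pvLoopA (pvSkipText rest2)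
termination_by ls => ls.length
decreasing_by
  have := pvSkipText_length_le rest2
  simp only [List.length_cons]
  omega

def validate_srt_format_py (content : String) : Bool :=
  pvLoopA (PySem.Chars.splitOn (PySem.Chars.strip content.toList) ['\n'])

-- ===== PORT B =====
-- 'len(g) >= 2 and g[0].strip().isdigit() and "-->" in g[1]'
def pvOkGroup (g : List (List Char)) : Bool :=
  decide (2 ≤ g.length) &&
    PySem.Chars.strIsdigit (PySem.Chars.strip (g.getD 0 [])) &&
    PySem.Chars.isIn ['-', '-', '>'] (g.getD 1 [])

def validate_srt_format_py_alt (content : String) : Bool :=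
  let lines := PySem.Chars.splitOn (PySem.Chars.strip content.toList) ['\n']
  let st := lines.foldl
    (fun (st : List (List (List Char)) × List (List Char)) line =>
      if PySem.Chars.strip line = [] then (st.1 ++ [st.2], []) else (st.1, st.2 ++ [line]))
    ([], [])
  (st.1 ++ [st.2]).all pvOkGroup

-- ===== PRECONDITION & SPEC =====
def Spec_validate_srt_format_py (content : String) (out : Bool) : Prop := out = validate_srt_format_py_alt content
instance (content : String) (out : Bool) : Decidable (Spec_validate_srt_format_py content out) := by unfold Spec_validate_srt_format_py; infer_instance

-- ===== CLAIM (what is proved, stated in full; the proofs are below) =====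
def Claim_equal_validate_srt_format_py : Prop := ∀ (content : String), Dom_validate_srt_format_py content → Spec_validate_srt_format_py content (validate_srt_format_py content)

-- ===== LEMMAS AND PROOFS =====

-- simple single-character split: content.strip().split('\n') as a plain recursion
def pvSplitCh : List Char → List (List Char)
  | [] => [[]]
  | c :: rest =>
    if c = '\n' then [] :: pvSplitCh rest
    else match pvSplitCh rest with
      | [] => [[c]]
      | g :: gs => (c :: g) :: gs

-- prepend to the head group
def pvMapHead (p : List Char) : List (List Char) → List (List Char)
  | [] => [p]
  | g :: gs => (p ++ g) :: gs

theorem pvSplitCh_ne_nil (cs : List Char) : pvSplitCh cs ≠ [] := by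
  cases cs with
  | nil => simp [pvSplitCh]
  | cons c rest =>
    simp only [pvSplitCh]
    split
    · simp
    · split <;> simp

theorem pvMapHead_mapHead (a b : List Char) (gs : List (List Char)) :
    pvMapHead a (pvMapHead b gs) = pvMapHead (a ++ b) gs := by
  cases gs <;> simp [pvMapHead]

theorem pvSplitCh_cons_ne (c : Char) (rest : List Char) (h : ¬ c = '\n') :
    pvSplitCh (c :: rest) = pvMapHead [c] (pvSplitCh rest) := by
  simp only [pvSplitCh, if_neg h]
  cases hr : pvSplitCh rest with
  | nil => simp [pvMapHead]
  | cons g gs => simp [pvMapHead]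

theorem pvGo_spec (fuel : Nat) (l cur : List Char) (acc : List (List Char))
    (h : l.length ≤ fuel) :
    PySem.Chars.splitOn.go ['\n'] fuel l cur acc
      = acc.reverse ++ pvMapHead cur.reverse (pvSplitCh l) := by
  induction fuel generalizing l cur acc with
  | zero =>
    have : l = [] := by simpa using h
    subst this
    simp [PySem.Chars.splitOn.go, pvSplitCh, pvMapHead]
  | succ fuel ih =>
    cases l with
    | nil => simp [PySem.Chars.splitOn.go, pvSplitCh, pvMapHead]
    | cons c rest =>
      by_cases hc : c = '\n'
      · subst hc
        have hpre : List.isPrefixOf ['\n'] ('\n' :: rest) = true := by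
          simp [List.isPrefixOf]
        rw [PySem.Chars.splitOn.go]
        simp only [hpre, if_pos]
        rw [ih _ _ _ (by simpa using Nat.le_of_succ_le_succ h)]
        simp only [pvSplitCh, List.reverse_cons, List.reverse_nil, List.nil_append,
          List.append_assoc, List.singleton_append, pvMapHead, List.length_singleton,
          List.drop_succ_cons, List.drop_zero]
        cases hr : pvSplitCh rest with
        | nil => exact absurd hr (pvSplitCh_ne_nil rest)
        | cons g gs => simp [pvMapHead]
      · have hpre : List.isPrefixOf ['\n'] (c :: rest) = false := by
          simp only [List.isPrefixOf, Bool.and_eq_false_iff, beq_eq_false_iff_ne, ne_eq]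
          exact Or.inl fun h' => hc h'.symm
        rw [PySem.Chars.splitOn.go]
        simp only [hpre, Bool.false_eq_true, if_false]
        rw [ih rest (c :: cur) acc (by simpa using Nat.le_of_succ_le_succ h)]
        rw [pvSplitCh_cons_ne c rest hc, pvMapHead_mapHead]
        simp

theorem pvSplitOn_eq (cs : List Char) :
    PySem.Chars.splitOn cs ['\n'] = pvSplitCh cs := by
  rw [PySem.Chars.splitOn, pvGo_spec (cs.length + 1) cs [] [] (Nat.le_succ _)]
  simp [pvMapHead]
  cases h : pvSplitCh cs with
  | nil => exact absurd h (pvSplitCh_ne_nil cs)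
  | cons g gs => simp [pvMapHead]

-- the grouping loop of B, as a plain recursion
def pvGroupsRec (cur : List (List Char)) : List (List Char) → List (List (List Char))
  | [] => [cur]
  | l :: ls =>
    if PySem.Chars.strip l = [] then cur :: pvGroupsRec [] ls
    else pvGroupsRec (cur ++ [l]) ls

-- 'line.strip() != ""' as a Bool predicate for takeWhile/dropWhile
def pvNB (l : List Char) : Bool := !(PySem.Chars.strip l == [])

theorem pvFoldl_groups (lines : List (List Char)) (gs : List (List (List Char)))
    (cur : List (List Char)) :
    (lines.foldl
      (fun (st : List (List (List Char)) × List (List Char)) line =>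
        if PySem.Chars.strip line = [] then (st.1 ++ [st.2], []) else (st.1, st.2 ++ [line]))
      (gs, cur)).1 ++
    [(lines.foldl
      (fun (st : List (List (List Char)) × List (List Char)) line =>
        if PySem.Chars.strip line = [] then (st.1 ++ [st.2], []) else (st.1, st.2 ++ [line]))
      (gs, cur)).2] = gs ++ pvGroupsRec cur lines := by
  induction lines generalizing gs cur with
  | nil => simp [pvGroupsRec]
  | cons l ls ih =>
    simp only [List.foldl_cons, pvGroupsRec]
    by_cases hb : PySem.Chars.strip l = []
    · simp only [hb, if_pos rfl, ih]
      simp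
    · rw [if_neg hb, if_neg hb, ih]

theorem pvGroupsRec_decomp (cur : List (List Char)) (lines : List (List Char)) :
    pvGroupsRec cur lines = (cur ++ lines.takeWhile pvNB) ::
      (match lines.dropWhile pvNB with
        | [] => []
        | _ :: ls => pvGroupsRec [] ls) := by
  induction lines generalizing cur with
  | nil => simp [pvGroupsRec]
  | cons l ls ih =>
    by_cases hb : PySem.Chars.strip l = []
    · have hnb : pvNB l = false := by simp [pvNB, hb]
      simp [pvGroupsRec, hb, List.takeWhile_cons, List.dropWhile_cons, hnb]
    · have hnb : pvNB l = true := by simp [pvNB, hb]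
      simp only [pvGroupsRec, if_neg hb, List.takeWhile_cons, List.dropWhile_cons, hnb,
        if_pos rfl, ih]
      simp

theorem pvSkipText_eq (ls : List (List Char)) :
    pvSkipText ls = (List.dropWhile pvNB ls).tail := by
  induction ls with
  | nil => simp [pvSkipText]
  | cons l ls ih =>
    by_cases hb : PySem.Chars.strip l = []
    · have hnb : pvNB l = false := by simp [pvNB, hb]
      simp [pvSkipText, hb, List.dropWhile_cons, hnb]
    · have hnb : pvNB l = true := by simp [pvNB, hb]
      simp [pvSkipText, hb, List.dropWhile_cons, hnb, ih]

theorem pvStrip_eq_nil_iff (l : List Char) :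
    PySem.Chars.strip l = [] ↔ ∀ c ∈ l, PySem.Chars.isspace c = true := by
  constructor
  · intro h c hc
    rw [← List.takeWhile_append_dropWhile (p := PySem.Chars.isspace) (l := l)] at hc
    rcases List.mem_append.mp hc with h1 | h2
    · exact List.mem_takeWhile_imp h1
    · have h' : List.dropWhile PySem.Chars.isspace
          (List.dropWhile PySem.Chars.isspace l).reverse = [] := by
        have := h
        simp only [PySem.Chars.strip, PySem.Chars.rstrip, PySem.Chars.lstrip] at this
        simpa using this
      exact List.dropWhile_eq_nil_iff.mp h' c (by simpa using h2)
  · intro h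
    have h1 : List.dropWhile PySem.Chars.isspace l = [] :=
      List.dropWhile_eq_nil_iff.mpr h
    simp [PySem.Chars.strip, PySem.Chars.rstrip, PySem.Chars.lstrip, h1]

theorem pvDash_mem_of_isIn (ts : List Char)
    (h : PySem.Chars.isIn ['-', '-', '>'] ts = true) : '-' ∈ ts := by
  have hinf : ['-', '-', '>'] <:+: ts := (PySem.Chars.isIn_iff_infix _ _).mp h
  exact hinf.mem (by simp)

theorem pvIsIn_false_of_blank (ts : List Char) (h : PySem.Chars.strip ts = []) :
    PySem.Chars.isIn ['-', '-', '>'] ts = false := by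
  by_contra hne
  have ht : PySem.Chars.isIn ['-', '-', '>'] ts = true := by
    cases hx : PySem.Chars.isIn ['-', '-', '>'] ts
    · exact absurd hx hne
    · rfl
  have hm : '-' ∈ ts := pvDash_mem_of_isIn ts ht
  have := (pvStrip_eq_nil_iff ts).mp h '-' hm
  simp [PySem.Chars.isspace] at this

theorem pvNB_of_isIn (ts : List Char)
    (h : PySem.Chars.isIn ['-', '-', '>'] ts = true) :
    ¬ PySem.Chars.strip ts = [] := by
  intro hb
  rw [pvIsIn_false_of_blank ts hb] at h
  exact Bool.false_ne_true h

theorem pvNB_of_digit (num : List Char)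
    (h : PySem.Chars.strIsdigit (PySem.Chars.strip num) = true) :
    ¬ PySem.Chars.strip num = [] := by
  intro hb
  rw [hb] at h
  simp [PySem.Chars.strIsdigit] at h

theorem pvLoopA_two (num ts : List Char) (rest2 : List (List Char)) :
    pvLoopA (num :: ts :: rest2) =
      if !(PySem.Chars.strIsdigit (PySem.Chars.strip num)) then false
      else if !(PySem.Chars.isIn ['-', '-', '>'] ts) then false
      else pvLoopA (pvSkipText rest2) := by
  rw [pvLoopA]

theorem pvLoopA_one (num : List Char) :
    pvLoopA [num] =
      if !(PySem.Chars.strIsdigit (PySem.Chars.strip num)) then false else false := by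
  rw [pvLoopA]

-- A's pointer walk equals B's group check, on line lists whose last line is non-blank
theorem pvMain : ∀ (n : Nat) (lines : List (List Char)), lines.length ≤ n → lines ≠ [] →
    (∀ last, lines.getLast? = some last → ¬ PySem.Chars.strip last = []) →
    pvLoopA lines = (pvGroupsRec [] lines).all pvOkGroup := by
  intro n
  induction n with
  | zero =>
    intro lines hlen hne _
    cases lines with
    | nil => exact absurd rfl hne
    | cons a b => simp at hlen
  | succ n ih =>
    intro lines hlen hne hlast
    cases lines with
    | nil => exact absurd rfl hne
    | cons num rest =>
      by_cases hd : PySem.Chars.strIsdigit (PySem.Chars.strip num) = true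
      · have hnbnum : pvNB num = true := by
          simp [pvNB, pvNB_of_digit num hd]
        cases rest with
        | nil =>
          rw [pvLoopA_one, if_neg (by simp [hd])]
          simp [pvGroupsRec, pvOkGroup, pvNB_of_digit num hd]
        | cons ts rest2 =>
          rw [pvLoopA_two, if_neg (by simp [hd])]
          by_cases hIn : PySem.Chars.isIn ['-', '-', '>'] ts = true
          · rw [if_neg (by simp [hIn])]
            have hnbts : pvNB ts = true := by
              simp [pvNB, pvNB_of_isIn ts hIn]
            rw [pvGroupsRec_decomp]
            have hg0 : pvOkGroup ([] ++ (num :: ts :: rest2).takeWhile pvNB) = true := by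
              simp only [List.nil_append, List.takeWhile_cons, hnbnum, hnbts, if_pos rfl]
              simp [pvOkGroup, hd, hIn]
            rw [List.all_cons, hg0, Bool.true_and]
            simp only [List.dropWhile_cons, hnbnum, hnbts, if_pos rfl]
            rw [pvSkipText_eq]
            cases hdw : List.dropWhile pvNB rest2 with
            | nil => simp [pvLoopA]
            | cons b ls =>
              simp only [List.tail_cons]
              have hbblank : PySem.Chars.strip b = [] := by
                have hw : List.dropWhile pvNB rest2 ≠ [] := by simp [hdw]
                have h2 := List.head_dropWhile_not pvNB hw
                have h3 : (List.dropWhile pvNB rest2).head hw = b := by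
                  simp [hdw]
                rw [h3] at h2
                simpa [pvNB] using h2
              have hsuf : b :: ls <:+ num :: ts :: rest2 := by
                have h1 : b :: ls <:+ rest2 := by
                  rw [← hdw]; exact List.dropWhile_suffix pvNB
                exact h1.trans (by exact ⟨[num, ts], rfl⟩)
              cases ls with
              | nil =>
                exfalso
                obtain ⟨pre, hpre⟩ := hsuf
                apply hlast b _ hbblank
                rw [← hpre, List.getLast?_concat]
              | cons l0 ls0 =>
                have hlen' : (l0 :: ls0).length ≤ n := by
                  have h1 : (b :: l0 :: ls0).length ≤ rest2.length :=
                    List.IsSuffix.length_le (by rw [← hdw]; exact List.dropWhile_suffix pvNB)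
                  simp only [List.length_cons] at h1 hlen ⊢
                  omega
                have hlast' : ∀ last, (l0 :: ls0).getLast? = some last →
                    ¬ PySem.Chars.strip last = [] := by
                  intro last hl
                  apply hlast last
                  obtain ⟨pre, hpre⟩ := hsuf
                  rw [← hpre, List.getLast?_append, List.getLast?_cons_cons, hl]
                  rfl
                exact ih (l0 :: ls0) hlen' (by simp) hlast'
          · rw [if_pos (by simp [hIn])]
            by_cases hbts : PySem.Chars.strip ts = []
            · have hnbts : pvNB ts = false := by simp [pvNB, hbts]
              rw [pvGroupsRec_decomp]
              simp only [List.nil_append, List.takeWhile_cons, hnbnum, hnbts, if_pos rfl]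
              simp [pvOkGroup, hIn]
            · have hnbts : pvNB ts = true := by simp [pvNB, hbts]
              rw [pvGroupsRec_decomp]
              simp only [List.nil_append, List.takeWhile_cons, hnbnum, hnbts, if_pos rfl]
              simp [pvOkGroup, hIn]
      · have hA : pvLoopA (num :: rest) = false := by
          cases rest with
          | nil => rw [pvLoopA_one, if_pos (by simp [hd])]
          | cons ts rest2 => rw [pvLoopA_two, if_pos (by simp [hd])]
        rw [hA]
        by_cases hbnum : PySem.Chars.strip num = []
        · rw [pvGroupsRec_decomp]
          have hnbnum : pvNB num = false := by simp [pvNB, hbnum]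
          simp only [List.nil_append, List.takeWhile_cons, hnbnum]
          simp [pvOkGroup]
        · have hnbnum : pvNB num = true := by simp [pvNB, hbnum]
          rw [pvGroupsRec_decomp]
          simp only [List.nil_append, List.takeWhile_cons, hnbnum, if_pos rfl]
          simp [pvOkGroup, hd]

theorem pvSplitCh_concat_last : ∀ (cs : List Char) (c : Char), c ≠ '\n' →
    ∃ g, (pvSplitCh (cs ++ [c])).getLast? = some (g ++ [c]) := by
  intro cs
  induction cs with
  | nil =>
    intro c hc
    refine ⟨[], ?_⟩
    simp [pvSplitCh, hc]
  | cons a cs ih =>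
    intro c hc
    obtain ⟨g, hg⟩ := ih c hc
    by_cases ha : a = '\n'
    · subst ha
      refine ⟨g, ?_⟩
      rw [List.cons_append, pvSplitCh]
      rw [if_pos rfl]
      cases hx : pvSplitCh (cs ++ [c]) with
      | nil => exact absurd hx (pvSplitCh_ne_nil _)
      | cons g0 gs =>
        rw [hx] at hg
        rw [List.getLast?_cons_cons, hg]
    · rw [List.cons_append, pvSplitCh_cons_ne a _ ha]
      cases hx : pvSplitCh (cs ++ [c]) with
      | nil => exact absurd hx (pvSplitCh_ne_nil _)
      | cons g0 gs =>
        rw [hx] at hg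
        cases gs with
        | nil =>
          simp only [List.getLast?_singleton, Option.some.injEq] at hg
          refine ⟨a :: g, ?_⟩
          simp [pvMapHead, hg]
        | cons g1 gs1 =>
          refine ⟨g, ?_⟩
          simp only [pvMapHead]
          rw [List.getLast?_cons_cons]
          rw [List.getLast?_cons_cons] at hg
          exact hg


-- the stripped content ends in a non-space character, so the last split line is non-blank
theorem pvStripped_last_ok (x : List Char) (h : PySem.Chars.strip x ≠ []) :
    ∀ last, (pvSplitCh (PySem.Chars.strip x)).getLast? = some last →
      ¬ PySem.Chars.strip last = [] := by
  intro last hlast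
  have hd : List.dropWhile PySem.Chars.isspace
      (PySem.Chars.lstrip x).reverse ≠ [] := by
    intro hnil
    apply h
    simp [PySem.Chars.strip, PySem.Chars.rstrip, hnil]
  have hns : PySem.Chars.isspace
      ((List.dropWhile PySem.Chars.isspace (PySem.Chars.lstrip x).reverse).head hd) = false :=
    List.head_dropWhile_not _ hd
  have hgl : (PySem.Chars.strip x).getLast? =
      some ((List.dropWhile PySem.Chars.isspace (PySem.Chars.lstrip x).reverse).head hd) := by
    simp only [PySem.Chars.strip, PySem.Chars.rstrip, List.getLast?_reverse]
    exact List.head?_eq_head hd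
  set c := (List.dropWhile PySem.Chars.isspace (PySem.Chars.lstrip x).reverse).head hd with hc
  have hcs : PySem.Chars.strip x = (PySem.Chars.strip x).dropLast ++ [c] := by
    have := List.dropLast_append_getLast h
    rw [(List.getLast_eq_iff_getLast?_eq_some h).mpr hgl] at this
    exact this.symm
  have hcnl : c ≠ '\n' := by
    intro hceq
    rw [hceq] at hns
    simp [PySem.Chars.isspace] at hns
  obtain ⟨g, hg⟩ := pvSplitCh_concat_last (PySem.Chars.strip x).dropLast c hcnl
  rw [hcs, hg] at hlast
  have hlast' : last = g ++ [c] := by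
    injection hlast with h'; exact h'.symm
  subst hlast'
  intro hblank
  have := (pvStrip_eq_nil_iff _).mp hblank c (by simp)
  rw [this] at hns
  simp at hns

-- ===== VERDICT (by name: the statement is the Claim_ definition above) =====
theorem validate_srt_format_py_spec : Claim_equal_validate_srt_format_py := by
  intro content _
  unfold Spec_validate_srt_format_py validate_srt_format_py validate_srt_format_py_alt
  simp only [pvSplitOn_eq]
  show pvLoopA (pvSplitCh (PySem.Chars.strip content.toList)) =
    (((pvSplitCh (PySem.Chars.strip content.toList)).foldl
      (fun (st : List (List (List Char)) × List (List Char)) line =>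
        if PySem.Chars.strip line = [] then (st.1 ++ [st.2], []) else (st.1, st.2 ++ [line]))
      ([], [])).1 ++
     [((pvSplitCh (PySem.Chars.strip content.toList)).foldl
      (fun (st : List (List (List Char)) × List (List Char)) line =>
        if PySem.Chars.strip line = [] then (st.1 ++ [st.2], []) else (st.1, st.2 ++ [line]))
      ([], [])).2]).all pvOkGroup
  rw [pvFoldl_groups, List.nil_append]
  by_cases hcs : PySem.Chars.strip content.toList = []
  · rw [hcs]
    show pvLoopA [[]] = (pvGroupsRec [] [[]]).all pvOkGroup
    rw [pvLoopA_one]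
    split <;> decide
  · exact pvMain (pvSplitCh (PySem.Chars.strip content.toList)).length
      (pvSplitCh (PySem.Chars.strip content.toList)) le_rfl
      (pvSplitCh_ne_nil _) (pvStripped_last_ok content.toList hcs)
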